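-- pv_equiv track=rewrite | github.com/photoionization/chrohime | docs/name_converter.py | strip_type_decorates
-- ===== SOURCE A (Python) =====
-- def strip_type_decorates(name):
--   if name.startswith('const '):
--     return strip_type_decorates(name[6:])
--   elif name.startswith('vector<'):
--     return strip_type_decorates(name[7:-1])
--   elif name.startswith('optional<'):
--     return strip_type_decorates(name[9:-1])
--   else:
--     return name
-- ===== SOURCE B (Python) =====
-- RULES = (('const ', 0), ('vector<', 1), ('optional<', 1))
--
-- def strip_type_decorates(name):
--   changed = True
--   while changed:
--     changed = False
--     for prefix, drop in RULES:
--       if name.startswith(prefix):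
--         name = name[len(prefix):len(name) - drop]
--         changed = True
--         break
--   return name
-- ===== Notes on version B (the rewrite author's own statement) =====
-- stated objective: idiomatic
-- what changed: Replaced the three-branch recursion by a data-driven while loop over a tuple of (prefix, trailing-chars-to-drop) rules, rewriting the string in a local variable until no rule matches.
import Mathlib
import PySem

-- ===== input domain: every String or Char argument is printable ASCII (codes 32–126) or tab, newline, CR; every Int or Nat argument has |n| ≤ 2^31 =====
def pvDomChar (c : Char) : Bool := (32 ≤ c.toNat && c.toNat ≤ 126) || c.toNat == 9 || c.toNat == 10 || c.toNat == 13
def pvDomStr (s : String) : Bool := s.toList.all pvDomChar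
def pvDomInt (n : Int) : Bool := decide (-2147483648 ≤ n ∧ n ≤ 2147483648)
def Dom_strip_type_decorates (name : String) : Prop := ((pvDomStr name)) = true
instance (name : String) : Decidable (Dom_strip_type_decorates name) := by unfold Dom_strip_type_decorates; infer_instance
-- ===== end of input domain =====

-- B replaces A's three-branch recursion by a data-driven loop over (prefix, trailing-drop) rules held in a local variable (idiomatic; return value proved equal).


-- ===== PORT A =====
-- termination helpers for the ports (cited by name in decreasing_by)
theorem pvSwLen {cs p : List Char} (h : PySem.Chars.startswith cs p = true) :
    p.length ≤ cs.length :=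
  List.IsPrefix.length_le ((PySem.Chars.startswith_iff _ _).mp h)

theorem pvSliceFromLt (cs : List Char) (a : Nat) (ha : 0 < a) (h : a ≤ cs.length) :
    (PySem.List.slice cs (some (a : Int)) none).length < cs.length := by
  rw [PySem.List.slice_from_natCast]
  simp only [List.length_drop]
  omega

theorem pvSliceNegOneLt (cs : List Char) (a : Nat) (h : 1 ≤ cs.length) :
    (PySem.List.slice cs (some (a : Int)) (some (-1))).length < cs.length := by
  simp only [PySem.List.length_slice, PySem.List.clampIdx_neg_one, PySem.List.clampIdx_natCast]
  omega

-- literal transliteration of A's recursion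
def pvStripA (cs : List Char) : List Char :=
  if h1 : PySem.Chars.startswith cs "const ".toList = true then
    pvStripA (PySem.List.slice cs (some 6) none)
  else if h2 : PySem.Chars.startswith cs "vector<".toList = true then
    pvStripA (PySem.List.slice cs (some 7) (some (-1)))
  else if h3 : PySem.Chars.startswith cs "optional<".toList = true then
    pvStripA (PySem.List.slice cs (some 9) (some (-1)))
  else
    cs
termination_by cs.length
decreasing_by
  · have := pvSwLen h1
    exact pvSliceFromLt cs 6 (by omega) (by simpa using this)
  · have := pvSwLen h2
    exact pvSliceNegOneLt cs 7 (le_trans (by decide) this)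
  · have := pvSwLen h3
    exact pvSliceNegOneLt cs 9 (le_trans (by decide) this)

def strip_type_decorates (name : String) : String := String.ofList (pvStripA name.toList)

-- ===== PORT B =====
-- the RULES tuple of Source B: (prefix, number of trailing characters to drop)
def pvRules : List (List Char × Nat) :=
  [("const ".toList, 0), ("vector<".toList, 1), ("optional<".toList, 1)]

-- one pass of Source B's inner for-loop: first matching rule applied, none = no rule fired
def pvStepB (cs : List Char) : Option (List Char) :=
  (pvRules.find? (fun r => PySem.Chars.startswith cs r.1)).map
    (fun r => PySem.List.slice cs (some (r.1.length : Int)) (some ((cs.length : Int) - (r.2 : Int))))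

-- what applying the first matching rule amounts to, branch by branch (used for termination and equivalence)
theorem pvStepB_eq (cs : List Char) :
    pvStepB cs =
      if PySem.Chars.startswith cs "const ".toList = true then
        some (PySem.List.slice cs (some 6) none)
      else if PySem.Chars.startswith cs "vector<".toList = true then
        some (PySem.List.slice cs (some 7) (some (-1)))
      else if PySem.Chars.startswith cs "optional<".toList = true then
        some (PySem.List.slice cs (some 9) (some (-1)))
      else none := by
  unfold pvStepB pvRules
  by_cases h1 : PySem.Chars.startswith cs "const ".toList = true
  · rw [if_pos h1]
    simp only [List.find?, h1, Option.map_some]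
    congr 1
    have h6 : (6:Nat) ≤ cs.length := by
      have := pvSwLen h1; rw [show "const ".toList.length = 6 from rfl] at this; exact this
    rw [show "const ".toList.length = 6 from rfl]
    have hc : ((cs.length : Int) - ((0:Nat):Int)) = ((cs.length : Nat):Int) := by omega
    rw [hc, PySem.List.slice_natCast]
    rw [show (6:Int) = ((6:Nat):Int) by norm_num, PySem.List.slice_from_natCast]
    exact List.take_of_length_le (by simp)
  · have h1b : PySem.Chars.startswith cs "const ".toList = false := by simpa using h1
    rw [if_neg h1]
    by_cases h2 : PySem.Chars.startswith cs "vector<".toList = true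
    · rw [if_pos h2]
      simp only [List.find?, h1b, h2, Option.map_some]
      congr 1
      have hlen : 1 ≤ cs.length := by
        have := pvSwLen h2; rw [show "vector<".toList.length = 7 from rfl] at this; omega
      rw [show "vector<".toList.length = 7 from rfl]
      have hc : ((cs.length : Int) - ((1:Nat):Int)) = ((cs.length - 1 : Nat):Int) := by omega
      rw [hc]
      simp [PySem.List.slice]
      try omega
    · have h2b : PySem.Chars.startswith cs "vector<".toList = false := by simpa using h2
      rw [if_neg h2]
      by_cases h3 : PySem.Chars.startswith cs "optional<".toList = true
      · rw [if_pos h3]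
        simp only [List.find?, h1b, h2b, h3, Option.map_some]
        congr 1
        have hlen : 1 ≤ cs.length := by
          have := pvSwLen h3; rw [show "optional<".toList.length = 9 from rfl] at this; omega
        rw [show "optional<".toList.length = 9 from rfl]
        have hc : ((cs.length : Int) - ((1:Nat):Int)) = ((cs.length - 1 : Nat):Int) := by omega
        rw [hc]
        simp [PySem.List.slice]
        try omega
      · have h3b : PySem.Chars.startswith cs "optional<".toList = false := by simpa using h3
        rw [if_neg h3]
        simp only [List.find?, h1b, h2b, h3b, Option.map_none]

theorem pvStepB_lt {cs cs' : List Char} (h : pvStepB cs = some cs') :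
    cs'.length < cs.length := by
  rw [pvStepB_eq] at h
  by_cases h1 : PySem.Chars.startswith cs "const ".toList = true
  · rw [if_pos h1] at h
    have h6 : (6:Nat) ≤ cs.length := by simpa using pvSwLen h1
    have := pvSliceFromLt cs 6 (by omega) h6
    simpa using Option.some_injective _ h ▸ this
  · rw [if_neg h1] at h
    by_cases h2 : PySem.Chars.startswith cs "vector<".toList = true
    · rw [if_pos h2] at h
      have hlen : 1 ≤ cs.length := le_trans (by decide) (pvSwLen h2)
      have := pvSliceNegOneLt cs 7 hlen
      simpa using Option.some_injective _ h ▸ this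
    · rw [if_neg h2] at h
      by_cases h3 : PySem.Chars.startswith cs "optional<".toList = true
      · rw [if_pos h3] at h
        have hlen : 1 ≤ cs.length := le_trans (by decide) (pvSwLen h3)
        have := pvSliceNegOneLt cs 9 hlen
        simpa using Option.some_injective _ h ▸ this
      · rw [if_neg h3] at h
        exact absurd h (by simp)

-- Source B's while loop: keep applying pvStepB until no rule matches
def pvLoopB (cs : List Char) : List Char :=
  match h : pvStepB cs with
  | some cs' => pvLoopB cs'
  | none => cs
termination_by cs.length
decreasing_by exact pvStepB_lt h

def strip_type_decorates_alt (name : String) : String := String.ofList (pvLoopB name.toList)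

-- ===== PRECONDITION & SPEC =====
def Spec_strip_type_decorates (name : String) (out : String) : Prop := out = strip_type_decorates_alt name
instance (name : String) (out : String) : Decidable (Spec_strip_type_decorates name out) := by unfold Spec_strip_type_decorates; infer_instance

-- ===== CLAIM (what is proved, stated in full; the proofs are below) =====
def Claim_equal_strip_type_decorates : Prop := ∀ (name : String), Dom_strip_type_decorates name → Spec_strip_type_decorates name (strip_type_decorates name)

-- ===== LEMMAS AND PROOFS =====
theorem pvLoopB_unfold (cs : List Char) :
    pvLoopB cs = match pvStepB cs with
      | some cs' => pvLoopB cs'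
      | none => cs := by
  rw [pvLoopB]
  cases hh : pvStepB cs <;> rfl

theorem pvStripA_eq_loopB (cs : List Char) : pvStripA cs = pvLoopB cs := by
  induction cs using pvStripA.induct with
  | case1 cs h1 ih =>
    rw [pvStripA, dif_pos h1, pvLoopB_unfold, pvStepB_eq, if_pos h1]
    exact ih
  | case2 cs h1 h2 ih =>
    rw [pvStripA, dif_neg h1, dif_pos h2, pvLoopB_unfold, pvStepB_eq,
      if_neg h1, if_pos h2]
    exact ih
  | case3 cs h1 h2 h3 ih =>
    rw [pvStripA, dif_neg h1, dif_neg h2, dif_pos h3, pvLoopB_unfold, pvStepB_eq,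
      if_neg h1, if_neg h2, if_pos h3]
    exact ih
  | case4 cs h1 h2 h3 =>
    rw [pvStripA, dif_neg h1, dif_neg h2, dif_neg h3, pvLoopB_unfold, pvStepB_eq,
      if_neg h1, if_neg h2, if_neg h3]

-- ===== VERDICT (by name: the statement is the Claim_ definition above) =====
theorem strip_type_decorates_spec : Claim_equal_strip_type_decorates := by
  intro name _
  unfold Spec_strip_type_decorates strip_type_decorates strip_type_decorates_alt
  rw [pvStripA_eq_loopB]
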